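-- pv_equiv track=rewrite | github.com/paliocha/nf-denovoslim | bin/locus_cluster.py | greedy_assign
-- ===== SOURCE A (Python) =====
-- from collections import defaultdict
--
-- def greedy_assign(candidates):
--     """Greedy one-to-one assignment: sort by alignment quality, assign first.
--
--     Each reference gene gets exactly one transcript (the best available),
--     and each transcript fills at most one gene.  Transcripts whose primary
--     gene is already filled can be *rescued* by a secondary alignment to an
--     unfilled gene.
--
--     Returns:
--         selected:   dict {transcript_id: gene_id} for winners
--         gene_pool:  dict {gene_id: [candidate_tx_ids]} (all candidates, for stats)
--         n_rescued:  count of transcripts assigned via a non-primary alignment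
--         tx_primary: dict {transcript_id: gene_id} mapping each tx to its
--                     best (primary) gene — used for map output
--     """
--     # Sort by quality: best alignment first
--     candidates.sort(reverse=True)
--
--     # Track all candidates per gene (for stats) and each tx's primary gene
--     gene_pool = defaultdict(list)
--     tx_primary = {}
--
--     for matches, qlen, qname, gene in candidates:
--         gene_pool[gene].append(qname)
--         if qname not in tx_primary:
--             tx_primary[qname] = gene  # first (=best) after sort
--
--     # Greedy assignment
--     selected = {}
--     used_tx = set()
--     filled_gene = set()
--     n_rescued = 0
--
--     for matches, qlen, qname, gene in candidates:
--         if qname in used_tx or gene in filled_gene: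
--             continue
--         selected[qname] = gene
--         used_tx.add(qname)
--         filled_gene.add(gene)
--         if tx_primary[qname] != gene:
--             n_rescued += 1
--
--     return selected, dict(gene_pool), n_rescued, tx_primary
-- ===== SOURCE B (Python) =====
-- def greedy_assign(candidates):
--     """Same result via repeated best-candidate extraction: instead of one scan
--     guarded by used/filled sets, pop the best remaining candidate and discard
--     every other candidate sharing its transcript or gene; n_rescued is derived
--     afterwards from the selected pairs.  Like A, sorts candidates in place."""
--     candidates.sort(reverse=True)
--
--     gene_pool = {}
--     tx_primary = {}
--     for _, _, qname, gene in candidates: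
--         gene_pool.setdefault(gene, []).append(qname)
--         if qname not in tx_primary:
--             tx_primary[qname] = gene  # first (=best) after sort
--
--     # extraction loop: best remaining wins, conflicts are filtered away
--     pairs = []
--     work = list(candidates)
--     while work:
--         _, _, q, g = work[0]
--         pairs.append((q, g))
--         work = [c for c in work[1:] if c[2] != q and c[3] != g]
--
--     selected = dict(pairs)
--     n_rescued = sum(1 for q, g in pairs if tx_primary[q] != g)
--     return selected, gene_pool, n_rescued, tx_primary
-- ===== Notes on version B (the rewrite author's own statement) =====
-- stated objective: alternative
-- what changed: The greedy selection no longer scans the sorted list once while maintaining used_tx/filled_gene sets; B repeatedly extracts the best remaining candidate and filters out every other candidate sharing its transcript or gene (a shrinking worklist), and n_rescued is computed afterwards from the selected pairs instead of inline.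
import Mathlib
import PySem

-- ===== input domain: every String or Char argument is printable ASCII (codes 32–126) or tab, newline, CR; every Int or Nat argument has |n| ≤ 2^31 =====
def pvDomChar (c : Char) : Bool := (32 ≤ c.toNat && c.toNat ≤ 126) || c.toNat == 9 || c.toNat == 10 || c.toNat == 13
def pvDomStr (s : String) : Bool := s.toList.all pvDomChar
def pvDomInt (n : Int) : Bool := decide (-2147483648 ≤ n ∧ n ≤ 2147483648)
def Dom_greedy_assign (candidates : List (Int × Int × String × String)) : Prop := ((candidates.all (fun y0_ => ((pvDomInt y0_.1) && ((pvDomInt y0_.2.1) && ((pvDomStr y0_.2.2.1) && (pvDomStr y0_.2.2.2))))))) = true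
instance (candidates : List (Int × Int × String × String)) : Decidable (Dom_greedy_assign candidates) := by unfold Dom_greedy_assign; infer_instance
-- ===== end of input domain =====

-- B replaces A's set-guarded scan by repeated best-candidate extraction with conflict
-- filtering, deriving n_rescued afterwards (alternative decomposition, similar cost); both
-- Pythons sort the argument list in place identically — the theorems are about the return value.

-- Python's tuple comparison is lexicographic: sort key into nested Lex products.
def pvSortKey (t : Int × Int × String × String) : Lex (Int × Lex (Int × Lex (String × String))) :=
  toLex (t.1, toLex (t.2.1, toLex (t.2.2.1, t.2.2.2)))

-- ===== PORT A =====
-- first loop: gene_pool[gene].append(qname) (defaultdict) and tx_primary first-wins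
def pvStepPool (st : PySem.Dict String (List String) × PySem.Dict String String)
    (c : Int × Int × String × String) :
    PySem.Dict String (List String) × PySem.Dict String String :=
  let qname := c.2.2.1
  let gene := c.2.2.2
  (st.1.modify gene [] (fun l => l ++ [qname]),
   if st.2.contains qname then st.2 else st.2.insert qname gene)

-- second loop: greedy selection against the finished tx_primary
-- (tx_primary[qname] cannot raise: every qname of the list is a key; get? is always some here)
def pvStepGreedy (tp : PySem.Dict String String)
    (st : PySem.Dict String String × PySem.Set String × PySem.Set String × Int)
    (c : Int × Int × String × String) :
    PySem.Dict String String × PySem.Set String × PySem.Set String × Int :=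
  let qname := c.2.2.1
  let gene := c.2.2.2
  if PySem.Set.contains st.2.1 qname || PySem.Set.contains st.2.2.1 gene then st
  else
    (st.1.insert qname gene, PySem.Set.add st.2.1 qname, PySem.Set.add st.2.2.1 gene,
     if tp.get? qname ≠ some gene then st.2.2.2 + 1 else st.2.2.2)

def greedy_assign (candidates : List (Int × Int × String × String)) :
    (List (String × String)) × (List (String × List String)) × Int × (List (String × String)) :=
  let cs := PySem.List.sorted candidates pvSortKey true
  let p1 := cs.foldl pvStepPool (PySem.Dict.empty, PySem.Dict.empty)
  let p2 := cs.foldl (pvStepGreedy p1.2)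
      (PySem.Dict.empty, PySem.Set.empty, PySem.Set.empty, (0 : Int))
  (p2.1.items, p1.1.items, p2.2.2.2, p1.2.items)

-- ===== PORT B =====
-- Source B's worklist loop: take the head of the (sorted) worklist, keep its pair, and filter
-- away every remaining candidate sharing its transcript or gene; terminates because the
-- worklist shrinks.
def pvSelect (l : List (Int × Int × String × String)) : List (String × String) :=
  match l with
  | [] => []
  | c :: rest =>
    (c.2.2.1, c.2.2.2) ::
      pvSelect (rest.filter (fun d => d.2.2.1 != c.2.2.1 && d.2.2.2 != c.2.2.2))
termination_by l.length
decreasing_by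
  simp only [List.length_cons, List.length_unattach]
  exact Nat.lt_succ_of_le (le_trans (List.length_filter_le _ _) (by simp))

def greedy_assign_alt (candidates : List (Int × Int × String × String)) :
    (List (String × String)) × (List (String × List String)) × Int × (List (String × String)) :=
  let cs := PySem.List.sorted candidates pvSortKey true
  let p1 := cs.foldl pvStepPool (PySem.Dict.empty, PySem.Dict.empty)
  let pairs := pvSelect cs
  let selected := pairs.foldl (fun d p => d.insert p.1 p.2) PySem.Dict.empty
  let n : Int := (pairs.countP (fun p => p1.2.get? p.1 != some p.2) : Int)
  (selected.items, p1.1.items, n, p1.2.items)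

-- ===== PRECONDITION & SPEC =====
def Spec_greedy_assign (candidates : List (Int × Int × String × String)) (out : (List (String × String)) × (List (String × List String)) × Int × (List (String × String))) : Prop := out = greedy_assign_alt candidates
instance (candidates : List (Int × Int × String × String)) (out : (List (String × String)) × (List (String × List String)) × Int × (List (String × String))) : Decidable (Spec_greedy_assign candidates out) := by unfold Spec_greedy_assign; infer_instance

-- ===== CLAIM (what is proved, stated in full; the proofs are below) =====
def Claim_equal_greedy_assign : Prop := ∀ (candidates : List (Int × Int × String × String)), Dom_greedy_assign candidates → Spec_greedy_assign candidates (greedy_assign candidates)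

-- ===== LEMMAS AND PROOFS =====

theorem pvSelect_nil : pvSelect [] = [] := by simp [pvSelect]

theorem pvSelect_cons (c : Int × Int × String × String)
    (m : List (Int × Int × String × String)) :
    pvSelect (c :: m) = (c.2.2.1, c.2.2.2) ::
      pvSelect (m.filter (fun d => d.2.2.1 != c.2.2.1 && d.2.2.2 != c.2.2.2)) := by
  rw [pvSelect]

-- a candidate survives A's guards iff its transcript and gene are still free
def pvPass (U F : PySem.Set String) (c : Int × Int × String × String) : Bool :=
  !(PySem.Set.contains U c.2.2.1) && !(PySem.Set.contains F c.2.2.2)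

theorem pv_contains_add (S : PySem.Set String) (x y : String) :
    PySem.Set.contains (PySem.Set.add S y) x = (PySem.Set.contains S x || x == y) := by
  rw [Bool.eq_iff_iff]
  simp [PySem.Set.mem_add, beq_iff_eq]

theorem pv_pass_add (U F : PySem.Set String) (q g : String)
    (d : Int × Int × String × String) :
    pvPass (PySem.Set.add U q) (PySem.Set.add F g) d
      = ((d.2.2.1 != q && d.2.2.2 != g) && pvPass U F d) := by
  simp only [pvPass, pv_contains_add]
  cases PySem.Set.contains U d.2.2.1 <;> cases PySem.Set.contains F d.2.2.2 <;>
    cases h1 : d.2.2.1 == q <;> cases h2 : d.2.2.2 == g <;> simp [bne, h1, h2]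

-- A's greedy fold over l with live guards U/F = B's extraction on the pre-filtered list
theorem pv_greedy_eq (tp : PySem.Dict String String)
    (l : List (Int × Int × String × String))
    (sel : PySem.Dict String String) (U F : PySem.Set String) (n : Int) :
    (l.foldl (pvStepGreedy tp) (sel, U, F, n)).1
      = (pvSelect (l.filter (pvPass U F))).foldl (fun d p => d.insert p.1 p.2) sel
    ∧ (l.foldl (pvStepGreedy tp) (sel, U, F, n)).2.2.2
      = n + ((pvSelect (l.filter (pvPass U F))).countP
              (fun p => tp.get? p.1 != some p.2) : Int) := by
  induction l generalizing sel U F n with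
  | nil => simp [pvSelect_nil]
  | cons c l ih =>
    by_cases hp : pvPass U F c = true
    · have hguard : (PySem.Set.contains U c.2.2.1 || PySem.Set.contains F c.2.2.2) = false := by
        simp only [pvPass] at hp
        cases hU : PySem.Set.contains U c.2.2.1 <;>
          cases hF : PySem.Set.contains F c.2.2.2 <;> simp_all
      have hfil : (c :: l).filter (pvPass U F) = c :: l.filter (pvPass U F) :=
        List.filter_cons_of_pos hp
      have hfil2 : l.filter (pvPass (PySem.Set.add U c.2.2.1) (PySem.Set.add F c.2.2.2))
          = (l.filter (pvPass U F)).filter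
              (fun d => d.2.2.1 != c.2.2.1 && d.2.2.2 != c.2.2.2) := by
        rw [List.filter_filter]
        exact List.filter_congr (fun d _ => pv_pass_add U F c.2.2.1 c.2.2.2 d)
      rw [hfil]
      simp only [List.foldl_cons, pvStepGreedy, hguard]
      rw [pvSelect_cons]
      obtain ⟨ih1, ih2⟩ := ih (sel.insert c.2.2.1 c.2.2.2)
        (PySem.Set.add U c.2.2.1) (PySem.Set.add F c.2.2.2)
        (if tp.get? c.2.2.1 ≠ some c.2.2.2 then n + 1 else n)
      constructor
      · simpa [hfil2] using ih1
      · rw [if_neg (show ¬(false = true) by simp)]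
        rw [ih2, hfil2, List.countP_cons]
        by_cases hne : tp.get? c.2.2.1 = some c.2.2.2
        · rw [if_neg (by simp [hne]), hne]
          simp
        · rw [if_pos hne]
          have : (tp.get? c.2.2.1 != some c.2.2.2) = true := by
            simp [bne_iff_ne, hne]
          rw [this]
          simp only [if_pos trivial]
          omega
    · have hguard : (PySem.Set.contains U c.2.2.1 || PySem.Set.contains F c.2.2.2) = true := by
        simp only [pvPass] at hp
        cases hU : PySem.Set.contains U c.2.2.1 <;>
          cases hF : PySem.Set.contains F c.2.2.2 <;> simp_all
      have hfil : (c :: l).filter (pvPass U F) = l.filter (pvPass U F) :=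
        List.filter_cons_of_neg (by simp [hp])
      rw [hfil]
      simp only [List.foldl_cons, pvStepGreedy, hguard, if_pos]
      exact ih sel U F n

-- nothing is guarded at the start: the initial filter is the identity
theorem pv_filter_empty (l : List (Int × Int × String × String)) :
    l.filter (pvPass PySem.Set.empty PySem.Set.empty) = l := by
  rw [List.filter_congr (q := fun _ => true) (fun d _ => by
    simp [pvPass, PySem.Set.empty, PySem.Set.contains])]
  exact List.filter_true l

-- ===== VERDICT (by name: the statement is the Claim_ definition above) =====
theorem greedy_assign_spec : Claim_equal_greedy_assign := by
  intro candidates _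
  show greedy_assign candidates = greedy_assign_alt candidates
  simp only [greedy_assign, greedy_assign_alt]
  obtain ⟨h1, h2⟩ := pv_greedy_eq
    ((PySem.List.sorted candidates pvSortKey true).foldl pvStepPool
      (PySem.Dict.empty, PySem.Dict.empty)).2
    (PySem.List.sorted candidates pvSortKey true)
    PySem.Dict.empty PySem.Set.empty PySem.Set.empty 0
  rw [pv_filter_empty] at h1 h2
  rw [h1, h2]
  simp
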